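-- pv_equiv track=rewrite | github.com/mik11231/python | advent2018/Day5/day5_part2.py | solve
-- ===== SOURCE A (Python) =====
-- def react(polymer: str) -> str:
--     stack: list[str] = []
--     for ch in polymer:
--         if stack and stack[-1] != ch and stack[-1].lower() == ch.lower():
--             stack.pop()
--         else:
--             stack.append(ch)
--     return "".join(stack)
--
-- def solve(polymer: str) -> int:
--     best = len(polymer)
--     for unit in "abcdefghijklmnopqrstuvwxyz":
--         filtered = (ch for ch in polymer if ch.lower() != unit)
--         reacted_len = len(react("".join(filtered)))
--         if reacted_len < best:
--             best = reacted_len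
--     return best
-- ===== SOURCE B (Python) =====
-- def fully_react(s: str) -> str:
--     chars = list(s)
--     changed = True
--     while changed:
--         changed = False
--         out = []
--         i = 0
--         while i < len(chars):
--             if i + 1 < len(chars) and chars[i] != chars[i + 1] and chars[i].lower() == chars[i + 1].lower():
--                 i += 2
--                 changed = True
--             else:
--                 out.append(chars[i])
--                 i += 1
--         chars = out
--     return "".join(chars)
--
-- def solve(polymer: str) -> int:
--     best = len(polymer)
--     for unit in "abcdefghijklmnopqrstuvwxyz":
--         reacted_len = len(fully_react("".join(ch for ch in polymer if ch.lower() != unit)))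
--         if reacted_len < best:
--             best = reacted_len
--     return best
-- ===== Notes on version B (the rewrite author's own statement) =====
-- stated objective: alternative
-- what changed: The stack-based single-pass reaction is replaced by a naive repeated-reduction: scan the string removing adjacent opposite-case pairs and repeat the whole scan until a pass removes nothing; equal by confluence of the reaction.
import Mathlib
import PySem

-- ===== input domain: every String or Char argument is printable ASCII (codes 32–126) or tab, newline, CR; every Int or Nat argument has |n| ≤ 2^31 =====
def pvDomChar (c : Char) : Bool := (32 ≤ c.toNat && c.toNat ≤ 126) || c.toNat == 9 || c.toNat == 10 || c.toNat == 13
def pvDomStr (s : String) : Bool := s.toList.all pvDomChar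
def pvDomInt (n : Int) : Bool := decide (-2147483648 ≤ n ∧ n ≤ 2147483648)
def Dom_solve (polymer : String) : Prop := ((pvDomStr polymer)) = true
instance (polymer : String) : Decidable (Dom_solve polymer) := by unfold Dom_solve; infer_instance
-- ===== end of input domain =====

-- B replaces A's stack-based reaction by naive repeated pair-removal scans until stable (alternative algorithm, same values by confluence).

-- ===== PORT A =====
-- stack kept head-first (head = Python's stack[-1]); the final join reverses it
def reactStep (stack : List Char) (ch : Char) : List Char :=
  match stack with
  | [] => [ch]
  | t :: rest =>
    if t ≠ ch ∧ PySem.Chars.lowerChar t = PySem.Chars.lowerChar ch then rest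
    else ch :: t :: rest

def react (cs : List Char) : List Char := (cs.foldl reactStep []).reverse

def solve (polymer : String) : Int :=
  let cs := polymer.toList
  ("abcdefghijklmnopqrstuvwxyz".toList).foldl
    (fun best unit =>
      let filtered := cs.filter (fun ch => PySem.Chars.lowerChar ch ≠ unit)
      let reactedLen : Int := (react filtered).length
      if reactedLen < best then reactedLen else best)
    ((cs.length : Int))

-- ===== PORT B =====
def pvReacts (a b : Char) : Bool :=
  a != b && (PySem.Chars.lowerChar a == PySem.Chars.lowerChar b)

-- one left-to-right scan removing disjoint adjacent reacting pairs; snd = whether anything was removed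
def passOnce : List Char → List Char × Bool
  | [] => ([], false)
  | [a] => ([a], false)
  | a :: b :: rest =>
    if pvReacts a b then ((passOnce rest).1, true)
    else ((a :: (passOnce (b :: rest)).1), (passOnce (b :: rest)).2)

theorem passOnce_length : ∀ l : List Char,
    (passOnce l).1.length ≤ l.length ∧ ((passOnce l).2 = true → (passOnce l).1.length < l.length) := by
  intro l
  induction l using passOnce.induct with
  | case1 => simp [passOnce]
  | case2 a => simp [passOnce]
  | case3 a b rest h ih =>
      obtain ⟨ih1, _⟩ := ih
      simp only [passOnce, h, if_true, List.length_cons]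
      exact ⟨by omega, fun _ => by omega⟩
  | case4 a b rest h ih =>
      obtain ⟨ih1, ih2⟩ := ih
      simp only [passOnce] at ih1 ih2 ⊢
      simp only [h] at ih1 ih2 ⊢
      simp at ih1 ih2 ⊢
      exact ⟨by omega, fun h2 => by have := ih2 h2; omega⟩

-- repeat scans until a scan removes nothing
def fullyReact (cs : List Char) : List Char :=
  if h : (passOnce cs).2 = true then fullyReact (passOnce cs).1 else (passOnce cs).1
termination_by cs.length
decreasing_by exact (passOnce_length cs).2 h

def solve_alt (polymer : String) : Int :=
  let cs := polymer.toList
  ("abcdefghijklmnopqrstuvwxyz".toList).foldl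
    (fun best unit =>
      let filtered := cs.filter (fun ch => PySem.Chars.lowerChar ch ≠ unit)
      let reactedLen : Int := (fullyReact filtered).length
      if reactedLen < best then reactedLen else best)
    ((cs.length : Int))

-- ===== PRECONDITION & SPEC =====
def Spec_solve (polymer : String) (out : Int) : Prop := out = solve_alt polymer
instance (polymer : String) (out : Int) : Decidable (Spec_solve polymer out) := by unfold Spec_solve; infer_instance

-- ===== CLAIM (what is proved, stated in full; the proofs are below) =====
def Claim_equal_solve : Prop := ∀ (polymer : String), Dom_solve polymer → Spec_solve polymer (solve polymer)

-- ===== LEMMAS AND PROOFS =====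

def NoReact (a b : Char) : Prop := pvReacts a b = false

theorem pvReacts_iff (a b : Char) :
    pvReacts a b = true ↔ a ≠ b ∧ PySem.Chars.lowerChar a = PySem.Chars.lowerChar b := by
  simp [pvReacts]

theorem pvReacts_false_iff (a b : Char) :
    pvReacts a b = false ↔ ¬ (a ≠ b ∧ PySem.Chars.lowerChar a = PySem.Chars.lowerChar b) := by
  simp [pvReacts]

theorem char_eq_of_toNat (a b : Char) (h : a.toNat = b.toNat) : a = b := by
  rw [← Char.ofNat_toNat a, h, Char.ofNat_toNat]

theorem upper_toNat (c : Char) (h : PySem.Chars.isupper c = true) :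
    65 ≤ c.toNat ∧ c.toNat ≤ 90 := by
  simp only [PySem.Chars.isupper, Bool.and_eq_true, decide_eq_true_eq] at h
  obtain ⟨h1, h2⟩ := h
  rw [Char.le_def] at h1 h2
  exact ⟨UInt32.le_iff_toNat_le.1 h1, UInt32.le_iff_toNat_le.1 h2⟩

theorem toNat_lowerChar (c : Char) :
    (PySem.Chars.lowerChar c).toNat =
      if PySem.Chars.isupper c then c.toNat + 32 else c.toNat := by
  unfold PySem.Chars.lowerChar
  by_cases h : PySem.Chars.isupper c = true
  · have hb := upper_toNat c h
    rw [if_pos h, if_pos h, Char.toNat_ofNat, if_pos]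
    unfold Nat.isValidChar
    left; omega
  · simp [h]

-- among chars, each letter has exactly one opposite-case partner
theorem pair_unique (t a b : Char) (hta : t ≠ a) (hba : b ≠ a)
    (h1 : PySem.Chars.lowerChar t = PySem.Chars.lowerChar a)
    (h2 : PySem.Chars.lowerChar b = PySem.Chars.lowerChar a) : t = b := by
  have H1 := congrArg Char.toNat h1
  have H2 := congrArg Char.toNat h2
  rw [toNat_lowerChar, toNat_lowerChar] at H1 H2
  cases hUt : PySem.Chars.isupper t <;> cases hUa : PySem.Chars.isupper a <;>
    cases hUb : PySem.Chars.isupper b <;> simp [hUt, hUa, hUb] at H1 H2 <;>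
    first
      | (exact char_eq_of_toNat t b (by omega))
      | (exact absurd (char_eq_of_toNat t a (by omega)) hta)
      | (exact absurd (char_eq_of_toNat b a (by omega)) hba)

theorem step_chain (st : List Char) (ch : Char) (h : List.IsChain NoReact st) :
    List.IsChain NoReact (reactStep st ch) := by
  match st with
  | [] => exact List.isChain_singleton ch
  | t :: rest =>
    simp only [reactStep]
    by_cases hc : t ≠ ch ∧ PySem.Chars.lowerChar t = PySem.Chars.lowerChar ch
    · rw [if_pos hc]; exact h.tail
    · rw [if_neg hc]
      refine List.isChain_cons_cons.2 ⟨?_, h⟩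
      rw [NoReact, pvReacts_false_iff]
      intro ⟨hne, hlow⟩
      exact hc ⟨hne.symm, hlow.symm⟩

theorem collapse (st : List Char) (a b : Char) (hab : pvReacts a b = true)
    (h : List.IsChain NoReact st) : reactStep (reactStep st a) b = st := by
  obtain ⟨hne, hlow⟩ := (pvReacts_iff a b).1 hab
  match st with
  | [] =>
    simp only [reactStep]
    rw [if_pos ⟨hne, hlow⟩]
  | t :: rest =>
    by_cases hc : t ≠ a ∧ PySem.Chars.lowerChar t = PySem.Chars.lowerChar a
    · have htb : t = b := pair_unique t a b hc.1 (Ne.symm hne) hc.2 hlow.symm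
      conv_lhs => rw [reactStep]
      rw [if_pos hc]
      match rest with
      | [] => simp only [reactStep]; rw [htb]
      | u :: rest' =>
        have hnr : NoReact t u := (List.isChain_cons_cons.1 h).1
        rw [NoReact, pvReacts_false_iff] at hnr
        simp only [reactStep]
        rw [if_neg, htb]
        intro ⟨hub, hlowub⟩
        refine hnr ⟨?_, ?_⟩
        · rw [htb]; exact Ne.symm hub
        · rw [htb]; exact hlowub.symm
    · conv_lhs => rw [reactStep]
      rw [if_neg hc]
      simp only [reactStep]
      rw [if_pos ⟨hne, hlow⟩]

theorem pass_fold : ∀ (l st : List Char), List.IsChain NoReact st →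
    List.foldl reactStep st (passOnce l).1 = List.foldl reactStep st l := by
  intro l
  induction l using passOnce.induct with
  | case1 => intro st _; simp [passOnce]
  | case2 a => intro st _; simp [passOnce]
  | case3 a b rest hab ih =>
      intro st hst
      simp only [passOnce, hab, if_true]
      rw [ih st hst]
      show _ = List.foldl reactStep (reactStep (reactStep st a) b) rest
      rw [collapse st a b hab hst]
  | case4 a b rest hab ih =>
      intro st hst
      simp only [passOnce]
      simp only [hab]
      simp only [Bool.false_eq_true, if_false, List.foldl_cons]
      exact ih (reactStep st a) (step_chain st a hst)

theorem pass_false : ∀ l : List Char, (passOnce l).2 = false →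
    (passOnce l).1 = l ∧ List.IsChain NoReact l := by
  intro l
  induction l using passOnce.induct with
  | case1 => intro _; exact ⟨rfl, List.isChain_nil⟩
  | case2 a => intro _; exact ⟨rfl, List.isChain_singleton a⟩
  | case3 a b rest hab ih => intro h; simp [passOnce, hab] at h
  | case4 a b rest hab ih =>
      intro h
      simp only [passOnce] at h ⊢
      simp only [hab] at h ⊢
      simp only [Bool.false_eq_true, if_false] at h ⊢
      obtain ⟨h1, h2⟩ := ih h
      refine ⟨by rw [h1], List.isChain_cons_cons.2 ⟨by simpa [NoReact] using hab, h2⟩⟩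

theorem fold_irred : ∀ (l st : List Char), List.IsChain NoReact l →
    (∀ t a, st.head? = some t → l.head? = some a → pvReacts t a = false) →
    List.foldl reactStep st l = l.reverse ++ st := by
  intro l
  induction l with
  | nil => intro st _ _; simp
  | cons a rest ih =>
      intro st hchain hbd
      have hstep : reactStep st a = a :: st := by
        match st with
        | [] => rfl
        | t :: st' =>
          have hf := hbd t a rfl rfl
          rw [pvReacts_false_iff] at hf
          simp only [reactStep]
          rw [if_neg hf]
      rw [List.foldl_cons, hstep, ih (a :: st) hchain.tail ?_]
      · simp
      · intro t d ht hd
        simp only [List.head?_cons, Option.some.injEq] at ht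
        match rest, hd with
        | d' :: rest', hd =>
          simp only [List.head?_cons, Option.some.injEq] at hd
          have := (List.isChain_cons_cons.1 hchain).1
          rw [← ht, ← hd]
          exact this

theorem fully_chain_S : ∀ l : List Char,
    List.IsChain NoReact (fullyReact l) ∧
      List.foldl reactStep [] (fullyReact l) = List.foldl reactStep [] l := by
  intro l
  induction l using fullyReact.induct with
  | case1 cs h ih =>
      rw [fullyReact]
      simp only [h, dite_true]
      refine ⟨ih.1, ?_⟩
      rw [ih.2]
      exact pass_fold cs [] List.isChain_nil
  | case2 cs h =>
      rw [fullyReact]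
      simp only [h]
      have hfalse : (passOnce cs).2 = false := by
        cases hcs : (passOnce cs).2
        · rfl
        · exact absurd hcs h
      have hp := pass_false cs hfalse
      rw [hp.1]
      exact ⟨hp.2, rfl⟩

theorem react_eq_fullyReact (l : List Char) : react l = fullyReact l := by
  obtain ⟨hc, hS⟩ := fully_chain_S l
  have hir := fold_irred (fullyReact l) [] hc (fun t a ht _ => by cases ht)
  rw [react, ← hS, hir]
  simp

-- ===== VERDICT (by name: the statement is the Claim_ definition above) =====
theorem solve_spec : Claim_equal_solve := by
  intro polymer _
  unfold Spec_solve solve solve_alt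
  simp only [react_eq_fullyReact]
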